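-- pv_equiv track=rewrite | github.com/Bluefly-Hub/Sensitivity_Analysis | cerberus_sensitivity/automation/orchestrator.py | _compute_depth_chunk
-- ===== SOURCE A (Python) =====
-- MAX_ITERATIONS_PER_RUN = 200
--
-- def _compute_depth_chunk(depth_count: int, density_count: int, foe_count: int) -> int:
--     if depth_count == 0:
--         return 0
--     combos_per_depth = density_count * foe_count
--     if combos_per_depth == 0:
--         return depth_count
--     chunk = depth_count
--     while combos_per_depth * chunk > MAX_ITERATIONS_PER_RUN and chunk > 1:
--         chunk -= 1
--     return max(1, chunk)
-- ===== SOURCE B (Python) =====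
-- MAX_ITERATIONS_PER_RUN = 200
--
-- def _compute_depth_chunk(depth_count: int, density_count: int, foe_count: int) -> int:
--     if depth_count == 0:
--         return 0
--     combos_per_depth = density_count * foe_count
--     if combos_per_depth == 0:
--         return depth_count
--     if combos_per_depth * depth_count <= MAX_ITERATIONS_PER_RUN:
--         # the whole depth range fits in one run
--         return max(1, depth_count)
--     return max(1, min(depth_count, MAX_ITERATIONS_PER_RUN // combos_per_depth))
-- ===== Notes on version B (the rewrite author's own statement) =====
-- stated objective: faster
-- what changed: Replaced the decrement-by-one search loop over chunk with an early 'fits in one run' return plus the closed-form max(1, min(depth_count, 200 // combos_per_depth)).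
import Mathlib
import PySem

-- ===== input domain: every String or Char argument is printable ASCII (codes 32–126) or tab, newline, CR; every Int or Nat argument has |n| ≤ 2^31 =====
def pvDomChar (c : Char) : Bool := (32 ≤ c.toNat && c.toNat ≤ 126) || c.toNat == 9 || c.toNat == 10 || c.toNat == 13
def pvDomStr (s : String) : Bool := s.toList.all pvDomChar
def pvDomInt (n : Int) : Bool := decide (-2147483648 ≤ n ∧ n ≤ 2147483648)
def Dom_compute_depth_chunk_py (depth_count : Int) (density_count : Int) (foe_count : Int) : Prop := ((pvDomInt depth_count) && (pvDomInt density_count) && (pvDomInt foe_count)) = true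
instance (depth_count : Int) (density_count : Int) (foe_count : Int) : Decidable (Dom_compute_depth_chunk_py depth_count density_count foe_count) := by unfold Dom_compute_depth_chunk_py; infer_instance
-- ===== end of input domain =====

-- B replaces A's linear decrement loop by an early "fits in one run" return plus the closed-form max 1 (min depth (200 // combos)); faster.

-- ===== PORT A =====
-- the while loop: decrement chunk while combos*chunk > 200 and chunk > 1
def pvChunkLoop (combos : Int) (chunk : Int) : Int :=
  if combos * chunk > 200 ∧ chunk > 1 then pvChunkLoop combos (chunk - 1) else chunk
termination_by (chunk - 1).toNat
decreasing_by omega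

def compute_depth_chunk_py (depth_count : Int) (density_count : Int) (foe_count : Int) : Int :=
  if depth_count = 0 then 0
  else
    let combos_per_depth := density_count * foe_count
    if combos_per_depth = 0 then depth_count
    else max 1 (pvChunkLoop combos_per_depth depth_count)

-- ===== PORT B =====
def compute_depth_chunk_py_alt (depth_count : Int) (density_count : Int) (foe_count : Int) : Int :=
  if depth_count = 0 then 0
  else
    let combos_per_depth := density_count * foe_count
    if combos_per_depth = 0 then depth_count
    else if combos_per_depth * depth_count ≤ 200 then max 1 depth_count
    else max 1 (min depth_count (PySem.Int.floordiv 200 combos_per_depth))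

-- ===== PRECONDITION & SPEC =====
def Spec_compute_depth_chunk_py (depth_count : Int) (density_count : Int) (foe_count : Int) (out : Int) : Prop := out = compute_depth_chunk_py_alt depth_count density_count foe_count
instance (depth_count : Int) (density_count : Int) (foe_count : Int) (out : Int) : Decidable (Spec_compute_depth_chunk_py depth_count density_count foe_count out) := by unfold Spec_compute_depth_chunk_py; infer_instance

-- ===== CLAIM =====
def Claim_equal_compute_depth_chunk_py : Prop := ∀ (depth_count : Int) (density_count : Int) (foe_count : Int), Dom_compute_depth_chunk_py depth_count density_count foe_count → Spec_compute_depth_chunk_py depth_count density_count foe_count (compute_depth_chunk_py depth_count density_count foe_count)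

-- ===== LEMMAS AND PROOFS =====

-- when the loop guard is false at entry the loop returns its argument
theorem pvChunkLoop_id (combos chunk : Int) (h : ¬ (combos * chunk > 200 ∧ chunk > 1)) :
    pvChunkLoop combos chunk = chunk := by
  rw [pvChunkLoop, if_neg h]

-- with a positive combos the loop computes max 1 (min chunk (200 fdiv combos)) up to the outer max 1
theorem pvChunkLoop_pos (combos : Int) (hc : 0 < combos) (chunk : Int) :
    max 1 (pvChunkLoop combos chunk) = max 1 (min chunk (PySem.Int.floordiv 200 combos)) := by
  rw [PySem.Int.floordiv_eq_ediv_of_pos hc]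
  induction chunk using pvChunkLoop.induct combos with
  | case1 chunk hgt ih =>
    rw [pvChunkLoop, if_pos hgt, ih]
    obtain ⟨h1, h2⟩ := hgt
    have hq : 200 / combos < chunk := by
      by_contra h
      push Not at h
      have := (Int.le_ediv_iff_mul_le hc).mp h
      nlinarith
    omega
  | case2 chunk hng =>
    rw [pvChunkLoop, if_neg hng]
    push Not at hng
    by_cases h2 : chunk > 1
    · have h1 : combos * chunk ≤ 200 := by
        by_contra hh
        push Not at hh
        have := hng hh
        omega
      have : chunk ≤ 200 / combos := (Int.le_ediv_iff_mul_le hc).mpr (by nlinarith)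
      omega
    · have : min chunk (200 / combos) ≤ 1 := by omega
      omega

-- ===== VERDICT =====
theorem compute_depth_chunk_py_spec : Claim_equal_compute_depth_chunk_py := by
  intro d den f _
  unfold Spec_compute_depth_chunk_py compute_depth_chunk_py compute_depth_chunk_py_alt
  by_cases hd : d = 0
  · simp [hd]
  · simp only [if_neg hd]
    set c := den * f with hcdef
    by_cases hc0 : c = 0
    · simp [hc0]
    · simp only [if_neg hc0]
      by_cases hfit : c * d ≤ 200
      · rw [if_pos hfit, pvChunkLoop_id c d (by rintro ⟨h1, _⟩; omega)]
      · rw [if_neg hfit]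
        by_cases hcn : c < 0
        · -- c < 0 and c*d > 200 force d < 0: loop guard never true, both sides are 1
          have hdneg : d < 0 := by nlinarith
          rw [pvChunkLoop_id c d (by rintro ⟨_, h2⟩; omega)]
          omega
        · exact pvChunkLoop_pos c (by omega) d
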